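-- pv_equiv track=rewrite | github.com/juanfraitu1/Rustle | scripts/disambiguate_parity_bundles.py | summarize_trace_events
-- ===== SOURCE A (Python) =====
-- from collections import defaultdict
--
-- def summarize_trace_events(rows: list[dict[str, str]]) -> str:
--     if not rows:
--         return ""
--     counts: dict[str, int] = defaultdict(int)
--     for rec in rows:
--         stage = rec.get("stage", "")
--         event = rec.get("event", "")
--         key = f"{stage}:{event}" if event else stage
--         counts[key] += 1
--     parts = [f"{k}={counts[k]}" for k in sorted(counts)]
--     return ",".join(parts)
-- ===== SOURCE B (Python) =====
-- def summarize_trace_events(rows: list[dict[str, str]]) -> str: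
--     # Build the flat list of composed keys, sort it, then scan consecutive
--     # runs of equal keys: each run length is that key's count. No counting
--     # dict is maintained.
--     keys = []
--     for rec in rows:
--         stage = rec.get("stage", "")
--         event = rec.get("event", "")
--         keys.append(f"{stage}:{event}" if event else stage)
--     keys.sort()
--     parts = []
--     i, n = 0, len(keys)
--     while i < n:
--         j = i + 1
--         while j < n and keys[j] == keys[i]:
--             j += 1
--         parts.append(f"{keys[i]}={j - i}")
--         i = j
--     return ",".join(parts)
-- ===== Notes on version B (the rewrite author's own statement) =====
-- stated objective: alternative
-- what changed: B replaces A's defaultdict counting pass plus sort-of-keys with a flat list of composed keys that is sorted once and then scanned in consecutive runs, each run length yielding the count; no counting dict exists.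
import Mathlib
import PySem

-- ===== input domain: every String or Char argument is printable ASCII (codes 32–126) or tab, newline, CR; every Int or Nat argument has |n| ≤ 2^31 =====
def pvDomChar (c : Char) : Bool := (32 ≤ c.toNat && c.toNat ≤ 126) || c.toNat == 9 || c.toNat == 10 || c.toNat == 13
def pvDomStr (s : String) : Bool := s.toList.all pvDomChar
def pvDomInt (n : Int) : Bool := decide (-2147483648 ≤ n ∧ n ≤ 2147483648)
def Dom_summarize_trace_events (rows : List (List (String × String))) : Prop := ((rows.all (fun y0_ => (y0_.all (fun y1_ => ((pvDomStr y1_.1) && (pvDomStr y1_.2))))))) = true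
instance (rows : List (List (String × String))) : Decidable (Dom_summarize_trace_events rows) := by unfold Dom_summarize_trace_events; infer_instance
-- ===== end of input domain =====

-- B replaces A's dict-counting pass by sort-then-run-scan; alternative decomposition, equal value proved.

-- key = f"{stage}:{event}" if event else stage  (shared by both Pythons line for line)
def composeKey (rec : List (String × String)) : String :=
  let stage := (PySem.Dict.mk rec).getD "stage" ""
  let event := (PySem.Dict.mk rec).getD "event" ""
  if event ≠ "" then stage ++ ":" ++ event else stage

-- ===== PORT A =====
def summarize_trace_events (rows : List (List (String × String))) : String :=
  if rows = [] then ""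
  else
    let counts : PySem.Dict String Int :=
      rows.foldl (fun d rec => d.modify (composeKey rec) 0 (· + 1)) PySem.Dict.empty
    let parts := (PySem.List.sorted counts.keys (fun k => k) false).map
      (fun k => k ++ "=" ++ PySem.Int.toStr (counts.getD k 0))
    PySem.Str.join "," parts

-- ===== PORT B =====
-- the inner 'while j < n and keys[j] == keys[i]' run scan, structurally
def groupRuns : List String → List (String × Int)
  | [] => []
  | x :: xs =>
      (x, 1 + ((xs.takeWhile (fun y => y == x)).length : Int)) ::
        groupRuns (xs.dropWhile (fun y => y == x))
termination_by l => l.length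
decreasing_by
  simpa using Nat.lt_succ_of_le (List.length_dropWhile_le _ _)

def summarize_trace_events_alt (rows : List (List (String × String))) : String :=
  let keys := PySem.List.sorted (rows.map composeKey) (fun k => k) false
  PySem.Str.join "," ((groupRuns keys).map (fun p => p.1 ++ "=" ++ PySem.Int.toStr p.2))

-- ===== PRECONDITION & SPEC =====
def Spec_summarize_trace_events (rows : List (List (String × String))) (out : String) : Prop := out = summarize_trace_events_alt rows
instance (rows : List (List (String × String))) (out : String) : Decidable (Spec_summarize_trace_events rows out) := by unfold Spec_summarize_trace_events; infer_instance

-- ===== CLAIM (what is proved, stated in full; the proofs are below) =====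
def Claim_equal_summarize_trace_events : Prop := ∀ (rows : List (List (String × String))), Dom_summarize_trace_events rows → Spec_summarize_trace_events rows (summarize_trace_events rows)

-- ===== LEMMAS AND PROOFS =====

-- every element of the dropped suffix of a ≤-sorted x :: xs is strictly greater than x
theorem drop_gt (x : String) (xs : List String)
    (h : (x :: xs).Pairwise (· ≤ ·)) :
    ∀ z ∈ xs.dropWhile (fun y => y == x), x < z := by
  intro z hz
  rcases List.pairwise_cons.mp h with ⟨hle, hxs⟩
  have hsub := List.dropWhile_sublist (l := xs) (fun y => y == x)
  have hd : (xs.dropWhile (fun y => y == x)).Pairwise (· ≤ ·) := hxs.sublist hsub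
  cases hdw : xs.dropWhile (fun y => y == x) with
  | nil => simp [hdw] at hz
  | cons y d' =>
    have hne : (y == x) = false := by
      have := List.head_dropWhile_not (fun y => y == x) (l := xs) (by simp [hdw])
      simpa [hdw] using this
    have hxy : x < y := by
      have hle' : x ≤ y := hle y (hsub.mem (by simp [hdw]))
      have : y ≠ x := by simpa using hne
      exact lt_of_le_of_ne hle' (Ne.symm this)
    rw [hdw] at hz
    rcases List.mem_cons.mp hz with rfl | hz'
    · exact hxy
    · rcases List.pairwise_cons.mp (hdw ▸ hd) with ⟨hyd, _⟩
      exact lt_of_lt_of_le hxy (hyd z hz')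

-- on a ≤-sorted list, groupRuns yields strictly increasing distinct keys
-- covering exactly the list, each paired with its multiplicity
theorem groupRuns_spec (s : List String) (hs : s.Pairwise (· ≤ ·)) :
    ((groupRuns s).map Prod.fst).Pairwise (· < ·) ∧
    (∀ k, k ∈ (groupRuns s).map Prod.fst ↔ k ∈ s) ∧
    (∀ p ∈ groupRuns s, p.2 = (s.count p.1 : Int)) := by
  induction s using groupRuns.induct with
  | case1 => simp [groupRuns]
  | case2 x xs ih =>
    set t := xs.takeWhile (fun y => y == x) with ht
    set d := xs.dropWhile (fun y => y == x) with hd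
    have hxs : xs.Pairwise (· ≤ ·) := (List.pairwise_cons.mp hs).2
    have hdpw : d.Pairwise (· ≤ ·) := hxs.sublist (List.dropWhile_sublist _)
    have hgt : ∀ z ∈ d, x < z := drop_gt x xs hs
    have hteq : ∀ z ∈ t, z = x := fun z hz => by
      have := List.mem_takeWhile_imp hz; simpa using this
    have htd : t ++ d = xs := List.takeWhile_append_dropWhile
    obtain ⟨ihpw, ihmem, ihcnt⟩ := ih hdpw
    have hmemd : ∀ z ∈ d, z ∈ xs := fun z hz => (List.dropWhile_sublist _).mem hz
    refine ⟨?_, ?_, ?_⟩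
    · rw [groupRuns]
      simp only [List.map_cons]
      refine List.pairwise_cons.mpr ⟨?_, ihpw⟩
      intro z hz
      exact hgt z ((ihmem z).mp hz)
    · intro k
      rw [groupRuns]
      simp only [List.map_cons, List.mem_cons]
      constructor
      · rintro (rfl | hk)
        · exact Or.inl rfl
        · exact Or.inr (hmemd k ((ihmem k).mp hk))
      · rintro (rfl | hk)
        · exact Or.inl rfl
        · rw [← htd] at hk
          rcases List.mem_append.mp hk with hk | hk
          · exact Or.inl (hteq k hk)
          · exact Or.inr ((ihmem k).mpr hk)
    · intro p hp
      rw [groupRuns] at hp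
      rcases List.mem_cons.mp hp with rfl | hp'
      · have hct : t.count x = t.length := List.count_eq_length.mpr
          (fun b hb => (hteq b hb).symm)
        have hcd : d.count x = 0 := List.count_eq_zero.mpr
          (fun hx => lt_irrefl x (hgt x hx))
        have hc : (x :: xs).count x = 1 + t.length := by
          rw [← htd]
          simp [List.count_append, hct, hcd]
          omega
        simp only [← ht]
        simp [hc]
      · have h1 := ihcnt p hp'
        have hpd : p.1 ∈ d := (ihmem p.1).mp (List.mem_map_of_mem hp')
        have hpx : p.1 ≠ x := fun h => lt_irrefl x (h ▸ hgt p.1 hpd)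
        have hct : t.count p.1 = 0 := List.count_eq_zero.mpr
          (fun hx => hpx (hteq p.1 hx))
        have hc : (x :: xs).count p.1 = d.count p.1 := by
          rw [← htd]
          simp [List.count_append, hct, Ne.symm hpx]
        rw [h1, hc]

-- ===== VERDICT (by name: the statement is the Claim_ definition above) =====
theorem summarize_trace_events_spec : Claim_equal_summarize_trace_events := by
  intro rows _
  unfold Spec_summarize_trace_events summarize_trace_events summarize_trace_events_alt
  by_cases hrows : rows = []
  · subst hrows
    simp [PySem.List.sorted, groupRuns, PySem.Str.join]
  · simp only [if_neg hrows]
    set keys := rows.map composeKey with hkeys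
    have hfold : rows.foldl (fun d rec => d.modify (composeKey rec) 0 (· + 1)) PySem.Dict.empty
        = PySem.Dict.counter keys := by
      rw [PySem.Dict.counter_eq_foldl, hkeys, List.foldl_map]
    rw [hfold, PySem.Dict.keys_counter]
    set s := PySem.List.sorted keys (fun k => k) false with hsdef
    have hspw : s.Pairwise (· ≤ ·) := PySem.List.sorted_pairwise keys (fun k => k)
    obtain ⟨hpw, hmem, hcnt⟩ := groupRuns_spec s hspw
    have hperm : ((groupRuns s).map Prod.fst).Perm (PySem.Set.ofList keys) := by
      rw [List.perm_ext_iff_of_nodup (hpw.imp ne_of_lt) (PySem.Set.nodup_ofList keys)]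
      intro k
      rw [hmem k, PySem.Set.mem_ofList, hsdef, PySem.List.mem_sorted]
    have hsorted : PySem.List.sorted (PySem.Set.ofList keys) (fun k => k) false
        = (groupRuns s).map Prod.fst :=
      PySem.List.sorted_eq_of_perm_of_pairwise_lt _ _ _ hperm hpw
    rw [hsorted, List.map_map]
    refine congrArg (PySem.Str.join ",") ?_
    apply List.map_congr_left
    intro p hp
    simp only [Function.comp]
    rw [PySem.Dict.getD_counter, ← (PySem.List.sorted_perm keys (fun k => k) false).count_eq,
      ← hsdef, ← hcnt p hp]
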